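-- pv_equiv track=rewrite | github.com/Meneth/parser | parser.py | icons
-- ===== SOURCE A (Python) =====
-- def icons(str):
-- 	result = ""
-- 	lines = str.split(',')
--
-- 	for line in lines:
-- 		insertIcon = False
-- 		hasInserted = False
-- 		for c in line:
-- 			if c.isalpha():
-- 				insertIcon = True
--
-- 			if insertIcon and not hasInserted:
-- 				result = result + "{{icon|"
-- 				hasInserted = True
-- 			result = result + c
-- 		result = result + "}}<br>"
-- 	if result.endswith("<br>"):
-- 		result = result[:-4]
-- 	return result
-- ===== SOURCE B (Python) =====
-- def icons(str):
--     parts = []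
--     for field in str.split(','):
--         i = next((i for i, c in enumerate(field) if c.isalpha()), None)
--         if i is None:
--             parts.append(field + "}}")
--         else:
--             parts.append(field[:i] + "{{icon|" + field[i:] + "}}")
--     return "<br>".join(parts)
-- ===== Notes on version B (the rewrite author's own statement) =====
-- stated objective: simpler
-- what changed: Replaces the character-by-character string accumulation with insertIcon/hasInserted flags by computing, per comma-field, the index of the first alphabetic character once and assembling each field by slicing, then joining the fields with the break tag; this also avoids A's repeated whole-string concatenation.
import Mathlib
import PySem

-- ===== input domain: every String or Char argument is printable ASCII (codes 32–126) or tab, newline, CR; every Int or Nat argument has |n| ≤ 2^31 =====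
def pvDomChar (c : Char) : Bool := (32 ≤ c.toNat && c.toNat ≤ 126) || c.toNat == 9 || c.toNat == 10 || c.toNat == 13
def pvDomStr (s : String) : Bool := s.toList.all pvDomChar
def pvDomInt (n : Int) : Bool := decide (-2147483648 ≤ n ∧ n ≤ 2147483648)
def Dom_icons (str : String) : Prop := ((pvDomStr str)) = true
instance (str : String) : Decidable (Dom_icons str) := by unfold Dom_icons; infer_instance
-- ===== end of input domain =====

-- B computes the first-alphabetic index per comma-field and slices, instead of A's
-- char-by-char accumulation with flags; objective: simpler (same asymptotic cost).

-- ===== PORT A =====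
-- one step of A's inner 'for c in line' loop; state = (result, insertIcon, hasInserted)
def iconsStep (p : List Char × Bool × Bool) (c : Char) : List Char × Bool × Bool :=
  let insertIcon := if PySem.Chars.isalpha c then true else p.2.1
  let rh := if insertIcon && !p.2.2 then (p.1 ++ "{{icon|".toList, true) else (p.1, p.2.2)
  (rh.1 ++ [c], insertIcon, rh.2)

def icons (str : String) : String :=
  let lines := PySem.Chars.splitOn str.toList [',']
  let result := lines.foldl
    (fun result line => (line.foldl iconsStep (result, false, false)).1 ++ "}}<br>".toList) []
  let result := if PySem.Chars.endswith result "<br>".toList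
    then PySem.Chars.slice result none (some (-4)) else result
  String.ofList result

-- ===== PORT B =====
-- one comma-field of B: slice at the first alphabetic index (none = no alphabetic char)
def iconsField (field : List Char) : List Char :=
  match field.findIdx? (fun c => PySem.Chars.isalpha c) with
  | none => field ++ "}}".toList
  | some i => field.take i ++ "{{icon|".toList ++ field.drop i ++ "}}".toList

def icons_alt (str : String) : String :=
  String.ofList (PySem.Chars.join "<br>".toList
    ((PySem.Chars.splitOn str.toList [',']).map iconsField))

-- ===== PRECONDITION & SPEC =====
def Spec_icons (str : String) (out : String) : Prop := out = icons_alt str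
instance (str : String) (out : String) : Decidable (Spec_icons str out) := by unfold Spec_icons; infer_instance

-- ===== CLAIM (what is proved, stated in full; the proofs are below) =====
def Claim_equal_icons : Prop := ∀ (str : String), Dom_icons str → Spec_icons str (icons str)

-- ===== LEMMAS AND PROOFS =====

-- after the icon has been inserted, A's inner loop just appends the remaining chars
theorem foldl_iconsStep_inserted (cs : List Char) (res : List Char) :
    (cs.foldl iconsStep (res, true, true)).1 = res ++ cs := by
  induction cs generalizing res with
  | nil => simp
  | cons c cs ih => simp [iconsStep, ih]

-- A's inner loop from the initial state computes B's field body (without the "}}")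
theorem foldl_iconsStep_eq (cs : List Char) (res : List Char) :
    (cs.foldl iconsStep (res, false, false)).1 =
      match cs.findIdx? (fun c => PySem.Chars.isalpha c) with
      | none => res ++ cs
      | some i => res ++ cs.take i ++ "{{icon|".toList ++ cs.drop i := by
  induction cs generalizing res with
  | nil => simp
  | cons c cs ih =>
    by_cases h : PySem.Chars.isalpha c
    · simp [List.findIdx?_cons, h, iconsStep, foldl_iconsStep_inserted]
    · have hstep : iconsStep (res, false, false) c = (res ++ [c], false, false) := by
        simp [iconsStep, h]
      rw [List.foldl_cons, hstep, ih]
      simp only [List.findIdx?_cons]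
      cases hfi : cs.findIdx? (fun c => PySem.Chars.isalpha c) <;> simp [h]

-- A's outer loop flattens the per-field bodies followed by "}}<br>"
theorem foldl_lines_eq (lines : List (List Char)) (res : List Char) :
    lines.foldl
      (fun result line => (line.foldl iconsStep (result, false, false)).1 ++ "}}<br>".toList) res
    = res ++ (lines.map (fun l => iconsField l ++ "<br>".toList)).flatten := by
  induction lines generalizing res with
  | nil => simp
  | cons l ls ih =>
    simp only [List.foldl_cons, ih, List.map_cons, List.flatten_cons]
    rw [foldl_iconsStep_eq]
    unfold iconsField
    cases hfi : l.findIdx? (fun c => PySem.Chars.isalpha c) <;> simp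

theorem flatten_fields (p : List Char) (rest : List (List Char)) :
    ((p :: rest).map (fun l => iconsField l ++ "<br>".toList)).flatten
      = PySem.Chars.join "<br>".toList ((p :: rest).map iconsField) ++ "<br>".toList := by
  induction rest generalizing p with
  | nil => simp [PySem.Chars.join_singleton]
  | cons q rest ih =>
    simp only [List.map_cons, List.flatten_cons] at ih ⊢
    rw [ih q, PySem.Chars.join_cons_cons]
    simp

-- ===== VERDICT (by name: the statement is the Claim_ definition above) =====
theorem icons_spec : Claim_equal_icons := by
  intro str _
  unfold Spec_icons icons icons_alt
  simp only [foldl_lines_eq, List.nil_append]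
  cases hsp : PySem.Chars.splitOn str.toList [','] with
  | nil => rw [if_neg (by decide)]; rfl
  | cons p rest =>
    rw [flatten_fields]
    have hend : PySem.Chars.endswith
        (PySem.Chars.join "<br>".toList ((p :: rest).map iconsField) ++ "<br>".toList)
        "<br>".toList = true := by
      rw [PySem.Chars.endswith_iff]; exact ⟨_, rfl⟩
    rw [if_pos hend, PySem.Chars.slice_eq_listSlice,
      PySem.List.slice_to_neg_ofNat _ 4 (by omega)]
    have hlen : (PySem.Chars.join "<br>".toList ((p :: rest).map iconsField)
        ++ "<br>".toList).length
        = (PySem.Chars.join "<br>".toList ((p :: rest).map iconsField)).length + 4 := by simp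
    rw [hlen, Nat.add_sub_cancel, List.take_left]
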